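-- pv_equiv track=rewrite | github.com/barakbl/stzsh | lib/parse_stzsh.py | parse_table
-- ===== SOURCE A (Python) =====
-- def parse_table(lines):
--     headers = None
--     result = []
--     for line in lines:
--         line = line.rstrip('\n')
--         if not line.strip():
--             continue
--         if headers is None:
--             headers = line.split()
--         else:
--             # maxsplit ensures last header absorbs remaining tokens (e.g. filenames with spaces)
--             tokens = line.split(None, len(headers) - 1)
--             row = {}
--             for i, header in enumerate(headers):
--                 row[header] = tokens[i].strip() if i < len(tokens) else ''
--             result.append(row)
--     return result
-- ===== SOURCE B (Python) =====
-- def _spans(line):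
--     # whitespace-separated token spans (start, end) found by a character scan
--     spans = []
--     i, n = 0, len(line)
--     while i < n:
--         if line[i].isspace():
--             i += 1
--         else:
--             j = i
--             while j < n and not line[j].isspace():
--                 j += 1
--             spans.append((i, j))
--             i = j
--     return spans
--
--
-- def parse_table(lines):
--     rows = []
--     for line in lines:
--         sp = _spans(line)
--         if sp:
--             rows.append((line, sp))
--     if not rows:
--         return []
--     hline, hsp = rows[0]
--     headers = [hline[a:b] for a, b in hsp]
--     h = len(headers)
--     result = []
--     for line, sp in rows[1:]:
--         vals = [line[a:b] for a, b in sp[:h - 1]]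
--         if len(sp) >= h:
--             # last column absorbs everything from token h to the last token
--             vals.append(line[sp[h - 1][0]:sp[-1][1]])
--         vals += [''] * (h - len(vals))
--         result.append(dict(zip(headers, vals)))
--     return result
-- ===== Notes on version B (the rewrite author's own statement) =====
-- stated objective: alternative
-- what changed: A parses each line with str.split/strip and a maxsplit re-split per row inside one flag-driven loop; B never calls split or strip: it computes the (start,end) index spans of each line's whitespace-separated tokens with a character-level scanner, takes the first spanned line's slices as headers, and builds every row value directly as a slice of the line, the last column as the single slice from the start of token h to the end of the last token.
import Mathlib
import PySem

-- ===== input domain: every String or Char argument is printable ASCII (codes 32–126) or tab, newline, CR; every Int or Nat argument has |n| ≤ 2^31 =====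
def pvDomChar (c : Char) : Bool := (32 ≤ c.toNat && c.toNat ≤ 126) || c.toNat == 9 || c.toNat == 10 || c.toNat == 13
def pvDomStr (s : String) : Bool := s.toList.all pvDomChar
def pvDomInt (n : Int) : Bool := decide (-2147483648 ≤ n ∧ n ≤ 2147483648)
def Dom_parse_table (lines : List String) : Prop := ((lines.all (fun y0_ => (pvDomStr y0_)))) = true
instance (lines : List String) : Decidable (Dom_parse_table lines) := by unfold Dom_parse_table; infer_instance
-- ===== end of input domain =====

-- B replaces A's split/strip pipeline by a character-level index scanner: it computes the
-- (start, end) spans of the whitespace-separated tokens of each line once, takes the first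
-- spanned line's slices as headers, and builds every row value directly as a slice of the
-- line (the last column as the single slice from token h to the end of the last token),
-- with no str.split, no strip and no maxsplit (objective: alternative, same cost).

-- ===== PORT A =====
-- s.rstrip('\n') — no PySem primitive takes a chars argument, hand port (exact:
-- removes exactly the trailing '\n' characters)
def pvRstripNl (s : String) : String :=
  String.ofList ((s.toList.reverse.dropWhile (fun c => c == '\n')).reverse)

-- row = {}; for i, header in enumerate(headers): row[header] = tokens[i].strip() if i < len(tokens) else ''
def pvRowA (headers tokens : List String) : List (String × String) :=
  ((PySem.List.enumerate headers).foldl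
    (fun (row : PySem.Dict String String) p =>
      row.insert p.2 (if p.1 < (tokens.length : Int) then PySem.Str.strip (PySem.List.pyGetD tokens p.1 "") else ""))
    PySem.Dict.empty).items

-- the for-loop of A, state = (headers : Option, result)
def pvGoA : Option (List String) → List (List (String × String)) → List String → List (List (String × String))
  | _, result, [] => result
  | headers?, result, raw :: rest =>
    let line := pvRstripNl raw
    if PySem.Str.strip line == "" then pvGoA headers? result rest
    else
      match headers? with
      | none => pvGoA (some (PySem.Str.split₀ line)) result rest
      | some headers =>
          pvGoA headers?
            (result ++ [pvRowA headers (PySem.Str.split₀Max line ((headers.length : Int) - 1))]) rest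

def parse_table (lines : List String) : List (List (String × String)) :=
  pvGoA none [] lines

-- ===== PORT B =====
-- _spans: the outer while-loop over the line; the inner while j advancing over
-- non-space characters is the takeWhile prefix, scanning resumes past it
def pvSpans : List Char → Nat → List (Nat × Nat)
  | [], _ => []
  | c :: rest, i =>
    if PySem.Chars.isspace c then pvSpans rest (i + 1)
    else
      let k := ((c :: rest).takeWhile (fun d => !PySem.Chars.isspace d)).length
      (i, i + k) :: pvSpans ((c :: rest).dropWhile (fun d => !PySem.Chars.isspace d)) (i + k)
  termination_by cs => cs.length
  decreasing_by
    all_goals simp_all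
    have := List.length_dropWhile_le (fun d => !PySem.Chars.isspace d) rest
    omega

-- line[a:b]
def pvSliceStr (s : String) (a b : Nat) : String :=
  PySem.Str.slice s (some (a : Int)) (some (b : Int))

-- first loop: collect the non-blank lines with their spans
def pvRowsB : List String → List (String × List (Nat × Nat))
  | [] => []
  | l :: ls =>
    let sp := pvSpans l.toList 0
    if sp.isEmpty then pvRowsB ls else (l, sp) :: pvRowsB ls

-- one data row: slices for the first h-1 spans, the absorbing slice for the last
-- column when there are at least h spans, '' padding, dict(zip(headers, vals))
def pvRowB (headers : List String) (line : String) (sp : List (Nat × Nat)) : List (String × String) :=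
  let h := headers.length
  let vals0 := (sp.take (h - 1)).map (fun p => pvSliceStr line p.1 p.2)
  let vals1 := if h ≤ sp.length then
      vals0 ++ [pvSliceStr line (sp.getD (h - 1) (0, 0)).1 ((sp.getLast?.getD (0, 0)).2)]
    else vals0
  let vals := vals1 ++ List.replicate (h - vals1.length) ""
  (PySem.Dict.ofList (headers.zip vals)).items

def parse_table_alt (lines : List String) : List (List (String × String)) :=
  match pvRowsB lines with
  | [] => []
  | (hl, hsp) :: rest =>
    let headers := hsp.map (fun p => pvSliceStr hl p.1 p.2)
    rest.map (fun r => pvRowB headers r.1 r.2)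

-- ===== PRECONDITION & SPEC =====
def Spec_parse_table (lines : List String) (out : List (List (String × String))) : Prop := out = parse_table_alt lines
instance (lines : List String) (out : List (List (String × String))) : Decidable (Spec_parse_table lines out) := by unfold Spec_parse_table; infer_instance

-- ===== CLAIM (what is proved, stated in full; the proofs are below) =====
def Claim_equal_parse_table : Prop := ∀ (lines : List String), Dom_parse_table lines → Spec_parse_table lines (parse_table lines)

-- ===== LEMMAS AND PROOFS =====

-- extraction of a span from the character list
def pvExt (cs : List Char) (p : Nat × Nat) : List Char := (cs.drop p.1).take (p.2 - p.1)

-- word list of a line, the common spec both ports reduce to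
def pvWords : List Char → List (List Char)
  | [] => []
  | c :: rest =>
    if PySem.Chars.isspace c then pvWords rest
    else ((c :: rest).takeWhile (fun d => !PySem.Chars.isspace d)) ::
      pvWords ((c :: rest).dropWhile (fun d => !PySem.Chars.isspace d))
  termination_by cs => cs.length
  decreasing_by
    all_goals simp_all
    have := List.length_dropWhile_le (fun d => !PySem.Chars.isspace d) rest
    omega

-- s.split(None, m) for m : Nat, in direct recursive form
def pvMaxW (m : Nat) (cs : List Char) : List (List Char) :=
  let l' := cs.dropWhile PySem.Chars.isspace
  if hl : l' = [] then []
  else if m = 0 then [l']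
  else (l'.takeWhile (fun d => !PySem.Chars.isspace d)) ::
    pvMaxW (m - 1) (l'.dropWhile (fun d => !PySem.Chars.isspace d))
  termination_by cs.length
  decreasing_by
    have h1 : l'.length ≤ cs.length := List.length_dropWhile_le PySem.Chars.isspace cs
    have h2 : l'.dropWhile (fun d => !PySem.Chars.isspace d) ≠ l' := by
      intro he
      rcases List.exists_cons_of_ne_nil hl with ⟨c, rest, hc⟩
      have hcs : PySem.Chars.isspace c = false := by
        have := List.head?_dropWhile_not PySem.Chars.isspace cs
        rw [show cs.dropWhile PySem.Chars.isspace = l' from rfl, hc] at this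
        simpa using this
      rw [hc] at he
      simp [List.dropWhile_cons, hcs] at he
      have := List.length_dropWhile_le (fun d => !PySem.Chars.isspace d) rest
      have := congrArg List.length he
      simp at this
      omega
    have h3 := List.length_dropWhile_le (fun d => !PySem.Chars.isspace d) l'
    have h4 : (l'.dropWhile (fun d => !PySem.Chars.isspace d)).length ≠ l'.length := by
      intro he
      exact h2 ((List.dropWhile_sublist _).eq_of_length he)
    have h5 : (l'.dropWhile (fun d => !PySem.Chars.isspace d)).length =
        (List.dropWhile (fun d => !PySem.Chars.isspace d) (List.dropWhile PySem.Chars.isspace cs)).length := rfl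
    omega

-- ---- basic facts about the span scanner and the PySem string primitives ----
lemma pvTakeDropLen (P : Char → Bool) (s : List Char) :
    (s.takeWhile P).length + (s.dropWhile P).length = s.length := by
  rw [← List.length_append, List.takeWhile_append_dropWhile]

lemma pvSpans_bounds : ∀ (s : List Char) (i : Nat) (p : Nat × Nat), p ∈ pvSpans s i →
    i ≤ p.1 ∧ p.1 < p.2 ∧ p.2 ≤ i + s.length := by
  intro s i
  fun_induction pvSpans s i with
  | case1 => simp
  | case2 c rest i hc ih =>
    intro p hp
    have := ih p hp
    simp only [List.length_cons]
    omega
  | case3 c rest i hc k ih =>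
    intro p hp
    have hsum := pvTakeDropLen (fun d => !PySem.Chars.isspace d) (c :: rest)
    have hk : 0 < k := by
      simp only [k, List.takeWhile_cons, hc]
      simp
    rcases List.mem_cons.mp hp with rfl | hp
    · simp only [List.length_cons] at hsum ⊢
      omega
    · have := ih p hp
      simp only [List.length_cons] at hsum ⊢
      omega

lemma pvSpans_pairwise : ∀ (s : List Char) (i : Nat),
    (pvSpans s i).Pairwise (fun p q => p.2 ≤ q.1) := by
  intro s i
  fun_induction pvSpans s i with
  | case1 => simp
  | case2 c rest i hc ih => exact ih
  | case3 c rest i hc k ih =>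
    refine List.Pairwise.cons ?_ ih
    intro q hq
    have := (pvSpans_bounds _ _ _ hq).1
    simpa using this

lemma pvSpans_eq_nil_iff : ∀ (s : List Char) (i : Nat),
    (pvSpans s i = [] ↔ s.all PySem.Chars.isspace) := by
  intro s i
  fun_induction pvSpans s i with
  | case1 => simp
  | case2 c rest i hc ih => simpa [hc] using ih
  | case3 c rest i hc k ih => simp [hc]

lemma pvRstrip_eq_nil_iff (s : List Char) :
    (PySem.Chars.rstrip s = [] ↔ s.all PySem.Chars.isspace) := by
  simp [PySem.Chars.rstrip, List.dropWhile_eq_nil_iff, List.all_eq_true]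

lemma pvStrip_eq_nil_iff (s : List Char) :
    (PySem.Chars.strip s = [] ↔ s.all PySem.Chars.isspace) := by
  simp only [PySem.Chars.strip, pvRstrip_eq_nil_iff, PySem.Chars.lstrip]
  simp only [List.all_eq_true, List.dropWhile_eq_nil_iff]
  constructor
  · intro h c hc
    by_cases hmem : c ∈ s.dropWhile PySem.Chars.isspace
    · exact h c hmem
    · have : c ∈ s.takeWhile PySem.Chars.isspace ∨ c ∈ s.dropWhile PySem.Chars.isspace := by
        rw [← List.mem_append, List.takeWhile_append_dropWhile]; exact hc
      rcases this with h' | h'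
      · exact List.mem_takeWhile_imp h'
      · exact absurd h' hmem
  · intro h c hc
    exact h c ((List.dropWhile_sublist _).mem hc)

lemma pvTakeWhile_eq_take (P : Char → Bool) (s : List Char) :
    s.takeWhile P = s.take ((s.takeWhile P).length) := by
  have := List.takeWhile_prefix (l := s) (p := P)
  exact List.prefix_iff_eq_take.mp this

lemma pvDropWhile_eq_drop (P : Char → Bool) (s : List Char) :
    s.dropWhile P = s.drop ((s.takeWhile P).length) := by
  rw [show s.drop ((s.takeWhile P).length)
        = (s.takeWhile P ++ s.dropWhile P).drop ((s.takeWhile P).length) from by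
          rw [List.takeWhile_append_dropWhile],
      List.drop_left]

lemma pvSpans_ext : ∀ (s : List Char) (i : Nat) (cs : List Char), cs.drop i = s →
    (pvSpans s i).map (pvExt cs) = pvWords s := by
  intro s i
  fun_induction pvSpans s i with
  | case1 => intro cs h; simp [pvWords]
  | case2 c rest i hc ih =>
    intro cs h
    rw [pvWords.eq_def]
    simp only [hc, if_pos]
    exact ih cs (by rw [← List.drop_drop, h]; rfl)
  | case3 c rest i hc k ih =>
    intro cs h
    rw [pvWords.eq_def]
    simp only [hc, List.map_cons]
    have hk : k = ((c :: rest).takeWhile (fun d => !PySem.Chars.isspace d)).length := rfl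
    congr 1
    · show pvExt cs (i, i + k) = _
      simp only [pvExt, h]
      rw [Nat.add_sub_cancel_left, hk]
      exact (pvTakeWhile_eq_take _ _).symm
    · refine ih cs ?_
      rw [← List.drop_drop, h, hk, ← pvDropWhile_eq_drop]

lemma pvGo_join : ∀ (cs : List Char),
    (∀ acc, PySem.Chars.split₀.go cs [] acc = acc.reverse ++ pvWords cs) ∧
    (∀ cur acc, cur ≠ [] → PySem.Chars.split₀.go cs cur acc =
      acc.reverse ++ (cur.reverse ++ cs.takeWhile (fun d => !PySem.Chars.isspace d)) ::
        pvWords (cs.dropWhile (fun d => !PySem.Chars.isspace d))) := by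
  intro cs
  induction cs with
  | nil =>
    constructor
    · intro acc; simp [PySem.Chars.split₀.go, pvWords]
    · intro cur acc hcur
      simp [PySem.Chars.split₀.go, pvWords, List.isEmpty_iff, hcur]
  | cons c rest ih =>
    constructor
    · intro acc
      by_cases hc : PySem.Chars.isspace c
      · rw [pvWords.eq_def]
        simp only [hc, if_pos]
        simp [PySem.Chars.split₀.go, hc]
        exact ih.1 acc
      · rw [pvWords.eq_def]
        simp only [hc, if_neg, Bool.false_eq_true, not_false_iff]
        simp [PySem.Chars.split₀.go, hc]
        rw [ih.2 [c] acc (by simp)]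
        simp [List.takeWhile_cons, List.dropWhile_cons, hc]
    · intro cur acc hcur
      by_cases hc : PySem.Chars.isspace c
      · simp [PySem.Chars.split₀.go, hc, List.isEmpty_iff, hcur]
        rw [ih.1 (cur.reverse :: acc)]
        simp [List.takeWhile_cons, List.dropWhile_cons, hc]
        conv_rhs => rw [pvWords.eq_def]
        simp [hc]
      · simp [PySem.Chars.split₀.go, hc, List.isEmpty_iff, hcur]
        rw [ih.2 (c :: cur) acc (by simp)]
        simp [List.takeWhile_cons, List.dropWhile_cons, hc]

lemma pvSplit₀_eq_words (cs : List Char) : PySem.Chars.split₀ cs = pvWords cs := by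
  have := (pvGo_join cs).1 []
  simpa [PySem.Chars.split₀] using this

lemma pvMaxGo : ∀ (fuel : Nat) (m : Nat) (s : List Char) (acc : List (List Char)),
    s.length < fuel →
    PySem.Chars.split₀Max.go fuel m s acc = acc.reverse ++ pvMaxW m s := by
  intro fuel
  induction fuel with
  | zero => intro m s acc h; omega
  | succ fuel ih =>
    intro m s acc h
    rw [pvMaxW.eq_def]
    simp only []
    cases hd : s.dropWhile PySem.Chars.isspace with
    | nil => simp [PySem.Chars.split₀Max.go, hd]
    | cons c rest =>
      have hlen : (c :: rest).length ≤ s.length := by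
        have := hd ▸ List.length_dropWhile_le PySem.Chars.isspace s
        simpa using this
      have hc : PySem.Chars.isspace c = false := by
        have := List.head?_dropWhile_not PySem.Chars.isspace s
        rw [hd] at this; simpa using this
      by_cases hm : m = 0
      · simp [PySem.Chars.split₀Max.go, hd, hm]
      · simp only [PySem.Chars.split₀Max.go, hd, hm, if_neg]
        rw [ih (m - 1) _ _ ?_]
        · simp [hd]
        · have h2 : ((c :: rest).dropWhile (fun d => !PySem.Chars.isspace d)).length < (c :: rest).length := by
            simp only [List.dropWhile_cons, hc, Bool.not_false, if_pos]
            have := List.length_dropWhile_le (fun d => !PySem.Chars.isspace d) rest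
            simp only [List.length_cons]; omega
          simp only [List.length_cons] at hlen h2 ⊢
          omega

lemma pvSplit₀Max_eq_maxW (cs : List Char) (m : Nat) :
    PySem.Chars.split₀Max cs (m : Int) = pvMaxW m cs := by
  rw [PySem.Chars.split₀Max]
  rw [if_neg (by omega)]
  rw [pvMaxGo _ _ _ _ (by omega)]
  simp

lemma pvRstrip_append_nonnil (u v : List Char) (hv : PySem.Chars.rstrip v ≠ []) :
    PySem.Chars.rstrip (u ++ v) = u ++ PySem.Chars.rstrip v := by
  unfold PySem.Chars.rstrip at *
  rw [List.reverse_append, List.dropWhile_append]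
  have hne : ¬(List.dropWhile PySem.Chars.isspace v.reverse).isEmpty := by
    simp only [List.isEmpty_iff]
    intro he; apply hv; rw [he]; rfl
  rw [if_neg hne, List.reverse_append, List.reverse_reverse]

lemma pvRstrip_append_space (u v : List Char) (hv : v.all PySem.Chars.isspace) :
    PySem.Chars.rstrip (u ++ v) = PySem.Chars.rstrip u := by
  unfold PySem.Chars.rstrip
  rw [List.reverse_append, List.dropWhile_append]
  rw [if_pos]
  simp only [List.isEmpty_iff, List.dropWhile_eq_nil_iff]
  intro c hc
  exact (List.all_eq_true.mp hv) c (List.mem_reverse.mp hc)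

lemma pvRstrip_nonspace (w : List Char) (hw : ∀ c ∈ w, PySem.Chars.isspace c = false) :
    PySem.Chars.rstrip w = w := by
  unfold PySem.Chars.rstrip
  rw [List.dropWhile_eq_self_iff.mpr, List.reverse_reverse]
  intro h
  have hm : w.reverse[0] ∈ w := List.mem_reverse.mp (List.getElem_mem _)
  simp only [List.getElem_reverse, Bool.not_eq_true]
  exact hw _ (List.getElem_mem _)

lemma pvRstrip_eq_take : ∀ (s : List Char) (i : Nat) (h : pvSpans s i ≠ []),
    PySem.Chars.rstrip s = s.take (((pvSpans s i).getLast h).2 - i) := by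
  intro s i
  fun_induction pvSpans s i with
  | case1 => intro h; exact absurd rfl h
  | case2 c rest i hc ih =>
    intro h
    have hrne : PySem.Chars.rstrip rest ≠ [] := by
      intro he
      exact h ((pvSpans_eq_nil_iff rest (i+1)).mpr ((pvRstrip_eq_nil_iff rest).mp he))
    have := ih h
    rcases pvSpans_bounds rest (i+1) _ (List.getLast_mem h) with ⟨h1, h2, h3⟩
    rw [show (c :: rest) = [c] ++ rest from rfl, pvRstrip_append_nonnil _ _ hrne, this]
    have he : ((pvSpans rest (i+1)).getLast h).2 - i = (((pvSpans rest (i+1)).getLast h).2 - (i+1)) + 1 := by omega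
    rw [he]
    simp [List.take_cons]
  | case3 c rest i hc k ih =>
    intro h
    have hk : k = ((c :: rest).takeWhile (fun d => !PySem.Chars.isspace d)).length := rfl
    have hwns : ∀ x ∈ (c :: rest).takeWhile (fun d => !PySem.Chars.isspace d),
        PySem.Chars.isspace x = false := by
      intro x hx
      have := List.mem_takeWhile_imp hx
      simpa using this
    have hsplit : (c :: rest) = (c :: rest).takeWhile (fun d => !PySem.Chars.isspace d)
        ++ (c :: rest).dropWhile (fun d => !PySem.Chars.isspace d) :=
      (List.takeWhile_append_dropWhile).symm
    by_cases ht : pvSpans ((c :: rest).dropWhile (fun d => !PySem.Chars.isspace d)) (i + k) = []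
    · -- no further spans: last span is (i, i+k)
      have hgl : ((i, i + k) :: pvSpans ((c :: rest).dropWhile (fun d => !PySem.Chars.isspace d)) (i + k)).getLast h = (i, i + k) := by
        simp [ht]
      rw [hgl]
      have hvsp : ((c :: rest).dropWhile (fun d => !PySem.Chars.isspace d)).all PySem.Chars.isspace :=
        (pvSpans_eq_nil_iff _ _).mp ht
      conv_lhs => rw [hsplit]
      rw [pvRstrip_append_space _ _ hvsp, pvRstrip_nonspace _ hwns]
      rw [Nat.add_sub_cancel_left, hk]
      exact pvTakeWhile_eq_take _ _
    · have hih := ih ht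
      have hb := pvSpans_bounds _ _ _ (List.getLast_mem ht)
      have hgl : ((i, i + k) :: pvSpans ((c :: rest).dropWhile (fun d => !PySem.Chars.isspace d)) (i + k)).getLast h =
          (pvSpans ((c :: rest).dropWhile (fun d => !PySem.Chars.isspace d)) (i + k)).getLast ht := List.getLast_cons ht
      rw [hgl]
      set e := (pvSpans ((c :: rest).dropWhile (fun d => !PySem.Chars.isspace d)) (i + k)).getLast ht with he
      obtain ⟨h1, h2, h3⟩ := hb
      have hrne : PySem.Chars.rstrip ((c :: rest).dropWhile (fun d => !PySem.Chars.isspace d)) ≠ [] := by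
        intro hee
        exact ht ((pvSpans_eq_nil_iff _ _).mpr ((pvRstrip_eq_nil_iff _).mp hee))
      conv_lhs => rw [hsplit]
      rw [pvRstrip_append_nonnil _ _ hrne, hih]
      have hlenk : ((c :: rest).takeWhile (fun d => !PySem.Chars.isspace d)).length ≤ e.2 - i := by
        rw [← hk]; omega
      conv_rhs => rw [hsplit]
      rw [List.take_append, List.take_of_length_le hlenk]
      congr 1
      rw [← hk]
      congr 1
      omega

lemma pvStrip_nonspace (w : List Char) (hw : ∀ c ∈ w, PySem.Chars.isspace c = false) :
    PySem.Chars.strip w = w := by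
  unfold PySem.Chars.strip PySem.Chars.lstrip
  rw [List.dropWhile_eq_self_iff.mpr, pvRstrip_nonspace w hw]
  intro h
  exact by simp [hw _ (List.getElem_mem _)]

lemma pvMaxW_drop_congr (m : Nat) (cs cs' : List Char)
    (h : cs.dropWhile PySem.Chars.isspace = cs'.dropWhile PySem.Chars.isspace) :
    pvMaxW m cs = pvMaxW m cs' := by
  rw [pvMaxW.eq_def]
  conv_rhs => rw [pvMaxW.eq_def]
  simp only [h]

lemma pvGetLast?_cons {α : Type} (a : α) (l : List α) (h : l ≠ []) :
    (a :: l).getLast? = l.getLast? := by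
  cases l with
  | nil => exact absurd rfl h
  | cons b t => simp [List.getLast?_cons_cons]

lemma pvRstrip_eq_take' (s : List Char) (i : Nat) (h : pvSpans s i ≠ []) :
    PySem.Chars.rstrip s = s.take ((((pvSpans s i).getLast?).getD (0,0)).2 - i) := by
  rw [pvRstrip_eq_take s i h, List.getLast?_eq_some_getLast (h := h)]
  rfl

lemma pvMaxW_strip : ∀ (s : List Char) (i : Nat) (cs : List Char), cs.drop i = s → ∀ m : Nat,
    (pvMaxW m s).map PySem.Chars.strip =
      (if (pvSpans s i).length ≤ m then (pvSpans s i).map (pvExt cs)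
       else ((pvSpans s i).take m).map (pvExt cs) ++
         [pvExt cs (((pvSpans s i).getD m (0,0)).1, (((pvSpans s i).getLast?).getD (0,0)).2)]) := by
  intro s i
  fun_induction pvSpans s i with
  | case1 =>
    intro cs h m
    rw [pvMaxW.eq_def]
    simp
  | case2 c rest i hc ih =>
    intro cs h m
    rw [pvMaxW_drop_congr m (c :: rest) rest (by simp [List.dropWhile_cons, hc])]
    exact ih cs (by rw [← List.drop_drop, h]; rfl) m
  | case3 c rest i hc k ih =>
    intro cs h m
    have hk : k = ((c :: rest).takeWhile (fun d => !PySem.Chars.isspace d)).length := rfl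
    have hd : (c :: rest).dropWhile PySem.Chars.isspace = c :: rest := by
      simp [List.dropWhile_cons, hc]
    have hwns : ∀ x ∈ (c :: rest).takeWhile (fun d => !PySem.Chars.isspace d),
        PySem.Chars.isspace x = false := by
      intro x hx
      have := List.mem_takeWhile_imp hx
      simpa using this
    have hdropcs : cs.drop (i + k) = (c :: rest).dropWhile (fun d => !PySem.Chars.isspace d) := by
      rw [← List.drop_drop, h, hk, ← pvDropWhile_eq_drop]
    have hext_head : pvExt cs (i, i + k) = (c :: rest).takeWhile (fun d => !PySem.Chars.isspace d) := by
      simp only [pvExt, h]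
      rw [Nat.add_sub_cancel_left, hk]
      exact (pvTakeWhile_eq_take _ _).symm
    have hspan : pvSpans (c :: rest) i =
        (i, i + k) :: pvSpans ((c :: rest).dropWhile (fun d => !PySem.Chars.isspace d)) (i + k) := by
      rw [pvSpans.eq_def]; simp only [hc, if_false, reduceIte]; rfl
    have hnil : pvSpans (c :: rest) i ≠ [] := by rw [hspan]; simp
    have hstrip : PySem.Chars.strip (c :: rest) = PySem.Chars.rstrip (c :: rest) := by
      unfold PySem.Chars.strip PySem.Chars.lstrip
      rw [List.dropWhile_cons]
      simp [hc]
    cases m with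
    | zero =>
      rw [pvMaxW.eq_def]
      simp only [hd]
      rw [if_pos (trivial : True), if_neg (by simp)]
      simp only [List.take_zero, List.map_nil, List.nil_append, List.map_cons, List.getD_cons_zero]
      rw [← hspan]
      rw [dif_neg (by simp : ¬(c :: rest = []))]
      simp only [List.map_cons, List.map_nil]
      congr 1
      rw [hstrip, pvRstrip_eq_take' (c :: rest) i hnil]
      simp [pvExt, h]
    | succ m' =>
      rw [pvMaxW.eq_def]
      simp only [hd]
      rw [dif_neg (by simp : ¬(c :: rest = []))]
      rw [if_neg (by simp)]
      simp only [List.map_cons, Nat.add_sub_cancel]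
      rw [ih cs hdropcs m']
      by_cases hlen : (pvSpans ((c :: rest).dropWhile (fun d => !PySem.Chars.isspace d)) (i + k)).length ≤ m'
      · rw [if_pos hlen, if_pos (by simp only [List.length_cons]; omega)]
        congr 1
        rw [pvStrip_nonspace _ hwns, hext_head]
      · have htne : pvSpans ((c :: rest).dropWhile (fun d => !PySem.Chars.isspace d)) (i + k) ≠ [] := by
          intro he; rw [he] at hlen; simp at hlen
        rw [if_neg hlen, if_neg (by simp only [List.length_cons]; omega)]
        simp only [List.take_succ_cons, List.map_cons, List.getD_cons_succ]
        rw [pvGetLast?_cons _ _ htne]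
        simp only [List.cons_append]
        congr 1
        rw [pvStrip_nonspace _ hwns, hext_head]

lemma pvExt_append (u v : List Char) (p : Nat × Nat) (h1 : p.1 ≤ p.2) (h2 : p.2 ≤ u.length) :
    pvExt (u ++ v) p = pvExt u p := by
  unfold pvExt
  rw [List.drop_append_of_le_length (by omega),
    List.take_append_of_le_length (by rw [List.length_drop]; omega)]

lemma pvTakeWhile_space_nil (v : List Char) (hv : v.all PySem.Chars.isspace) :
    v.takeWhile (fun d => !PySem.Chars.isspace d) = [] := by
  cases v with
  | nil => rfl
  | cons c t =>
    rw [List.takeWhile_cons]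
    simp only [List.all_cons, Bool.and_eq_true] at hv
    simp [hv.1]

lemma pvDropWhile_space_self (v : List Char) (hv : v.all PySem.Chars.isspace) :
    v.dropWhile (fun d => !PySem.Chars.isspace d) = v := by
  cases v with
  | nil => rfl
  | cons c t =>
    rw [List.dropWhile_cons]
    simp only [List.all_cons, Bool.and_eq_true] at hv
    simp [hv.1]

lemma pvSpans_append_space (u : List Char) (v : List Char) (hv : v.all PySem.Chars.isspace) :
    ∀ i, pvSpans (u ++ v) i = pvSpans u i := by
  intro i
  fun_induction pvSpans u i with
  | case1 =>
    simp only [List.nil_append]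
    exact (pvSpans_eq_nil_iff v _).mpr hv
  | case2 c rest i hc ih =>
    rw [List.cons_append, pvSpans.eq_def]
    simp only [hc, if_pos]
    exact ih
  | case3 c rest i hc k ih =>
    have hk : k = ((c :: rest).takeWhile (fun d => !PySem.Chars.isspace d)).length := rfl
    rw [List.cons_append, pvSpans.eq_def]
    simp only [hc, Bool.false_eq_true, if_false, reduceIte]
    rw [← List.cons_append, List.takeWhile_append, List.dropWhile_append]
    by_cases hall : (List.dropWhile (fun d => !PySem.Chars.isspace d) (c :: rest)).isEmpty
    · -- the word consumes all of c :: rest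
      have hlen : ((c :: rest).takeWhile (fun d => !PySem.Chars.isspace d)).length = (c :: rest).length := by
        have hs := pvTakeDropLen (fun d => !PySem.Chars.isspace d) (c :: rest)
        simp only [List.isEmpty_iff] at hall
        rw [hall] at hs
        simpa using hs
      rw [if_pos hall, if_pos hlen, pvTakeWhile_space_nil v hv, pvDropWhile_space_self v hv]
      simp only [List.isEmpty_iff] at hall
      rw [hall] at ih ⊢
      rw [List.append_nil, ← hlen, ← hk]
      have h1 : pvSpans v (i + k) = [] := (pvSpans_eq_nil_iff v _).mpr hv
      have h2 : pvSpans ([] : List Char) (i + k) = [] := (pvSpans_eq_nil_iff [] _).mpr (by simp)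
      rw [h1, h2]
    · have hlen : ¬((c :: rest).takeWhile (fun d => !PySem.Chars.isspace d)).length = (c :: rest).length := by
        have hs := pvTakeDropLen (fun d => !PySem.Chars.isspace d) (c :: rest)
        simp only [List.isEmpty_iff] at hall
        intro he
        apply hall
        have := List.length_eq_zero_iff.mp (by omega : (List.dropWhile (fun d => !PySem.Chars.isspace d) (c :: rest)).length = 0)
        exact this
      rw [if_neg hall, if_neg hlen, ← hk]
      congr 1

lemma pvRstripNl_decomp (s : String) :
    s.toList = (pvRstripNl s).toList ++ ((s.toList.reverse.takeWhile (fun c => c == '\n')).reverse) ∧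
    ((s.toList.reverse.takeWhile (fun c => c == '\n')).reverse).all PySem.Chars.isspace := by
  constructor
  · unfold pvRstripNl
    rw [String.toList_ofList, ← List.reverse_append,
      List.takeWhile_append_dropWhile (p := fun c => c == '\n') (l := s.toList.reverse),
      List.reverse_reverse]
  · rw [List.all_eq_true]
    intro c hc
    have := List.mem_takeWhile_imp (List.mem_reverse.mp hc)
    have hcn : c = '\n' := by simpa using this
    rw [hcn]
    decide

lemma pvSliceStr_ext (l : String) (a b : Nat) :
    pvSliceStr l a b = String.ofList (pvExt l.toList (a, b)) := by
  unfold pvSliceStr pvExt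
  rw [PySem.Str.slice]
  congr 1
  rw [PySem.Chars.slice_eq_listSlice, PySem.List.slice_natCast]

lemma pvStrip_ofList (cs : List Char) :
    PySem.Str.strip (String.ofList cs) = String.ofList (PySem.Chars.strip cs) := by
  rw [PySem.Str.strip, String.toList_ofList]

-- the two span views of a line: spans of the line = spans of its '\n'-stripped core
lemma pvSpans_line (l : String) :
    pvSpans l.toList 0 = pvSpans (pvRstripNl l).toList 0 := by
  obtain ⟨hdec, hsp⟩ := pvRstripNl_decomp l
  rw [hdec, pvSpans_append_space _ _ hsp]

lemma pvBlank_iff (l : String) :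
    (PySem.Str.strip (pvRstripNl l) == "") = (pvSpans l.toList 0).isEmpty := by
  rw [Bool.eq_iff_iff, beq_iff_eq, List.isEmpty_iff, pvSpans_line]
  rw [show ("" : String) = String.ofList [] from rfl]
  constructor
  · intro h
    apply (pvSpans_eq_nil_iff _ _).mpr
    apply (pvStrip_eq_nil_iff _).mp
    have := congrArg String.toList h
    rw [PySem.Str.toList_strip, String.toList_ofList] at this
    exact this
  · intro h
    have hall := (pvSpans_eq_nil_iff _ _).mp h
    have := (pvStrip_eq_nil_iff _).mpr hall
    rw [← String.toList_inj, PySem.Str.toList_strip, String.toList_ofList]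
    exact this

lemma pvHeaders_eq (l : String) :
    PySem.Str.split₀ (pvRstripNl l) = (pvSpans l.toList 0).map (fun p => pvSliceStr l p.1 p.2) := by
  rw [PySem.Str.split₀, pvSplit₀_eq_words]
  rw [← pvSpans_ext (pvRstripNl l).toList 0 (pvRstripNl l).toList rfl]
  rw [← pvSpans_line]
  rw [List.map_map]
  apply List.map_congr_left
  intro p hp
  obtain ⟨h1, h2, h3⟩ := pvSpans_bounds _ _ _ hp
  rw [pvSliceStr_ext]
  simp only [Function.comp_apply]
  congr 1
  obtain ⟨hdec, hsp⟩ := pvRstripNl_decomp l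
  have hp' : p ∈ pvSpans (pvRstripNl l).toList 0 := by rw [← pvSpans_line]; exact hp
  have hb := pvSpans_bounds _ _ _ hp'
  rw [hdec, pvExt_append _ _ _ (by omega) (by omega)]

-- B's row value list equals the stripped maxsplit tokens of A
lemma pvVals_eq (h : Nat) (hh : 1 ≤ h) (l : String) :
    ((PySem.Str.split₀Max (pvRstripNl l) ((h : Int) - 1)).map PySem.Str.strip) =
      (if h ≤ (pvSpans l.toList 0).length then
        (((pvSpans l.toList 0).take (h - 1)).map (fun p => pvSliceStr l p.1 p.2)) ++
          [pvSliceStr l ((pvSpans l.toList 0).getD (h - 1) (0, 0)).1 ((((pvSpans l.toList 0).getLast?).getD (0, 0)).2)]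
      else ((pvSpans l.toList 0).take (h - 1)).map (fun p => pvSliceStr l p.1 p.2)) := by
  have hcast : ((h : Int) - 1) = (((h - 1 : Nat)) : Int) := by omega
  rw [PySem.Str.split₀Max, hcast, pvSplit₀Max_eq_maxW, List.map_map]
  have hcomp : (PySem.Str.strip ∘ String.ofList) = (String.ofList ∘ PySem.Chars.strip) :=
    funext fun cs => by rw [Function.comp_apply, Function.comp_apply, pvStrip_ofList]
  rw [hcomp, ← List.map_map]
  rw [pvMaxW_strip (pvRstripNl l).toList 0 (pvRstripNl l).toList rfl (h - 1)]
  rw [pvSpans_line l]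
  obtain ⟨hdec, hspv⟩ := pvRstripNl_decomp l
  have hslice : ∀ p ∈ pvSpans (pvRstripNl l).toList 0,
      pvSliceStr l p.1 p.2 = String.ofList (pvExt (pvRstripNl l).toList p) := by
    intro p hp
    obtain ⟨b1, b2, b3⟩ := pvSpans_bounds _ _ _ hp
    rw [pvSliceStr_ext]
    congr 1
    rw [hdec, pvExt_append _ _ _ (by omega) (by omega)]
  by_cases hL : (pvSpans (pvRstripNl l).toList 0).length ≤ h - 1
  · rw [if_pos hL, if_neg (by omega)]
    rw [List.take_of_length_le hL, List.map_map]
    apply List.map_congr_left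
    intro p hp
    rw [Function.comp_apply, hslice p hp]
  · rw [if_neg hL, if_pos (by omega)]
    rw [List.map_append, List.map_map]
    congr 1
    · apply List.map_congr_left
      intro p hp
      rw [Function.comp_apply, hslice p (List.mem_of_mem_take hp)]
    · simp only [List.map_cons, List.map_nil]
      congr 1
      have hlt : h - 1 < (pvSpans (pvRstripNl l).toList 0).length := by omega
      have hne : pvSpans (pvRstripNl l).toList 0 ≠ [] := by
        intro he; rw [he] at hlt; simp at hlt
      have hgd : (pvSpans (pvRstripNl l).toList 0).getD (h - 1) (0,0) =
          (pvSpans (pvRstripNl l).toList 0)[h - 1]'hlt := List.getD_eq_getElem _ _ hlt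
      have hgl : ((pvSpans (pvRstripNl l).toList 0).getLast?).getD (0,0) =
          (pvSpans (pvRstripNl l).toList 0).getLast hne := by
        rw [List.getLast?_eq_some_getLast (h := hne)]; rfl
      have hmem1 : (pvSpans (pvRstripNl l).toList 0)[h - 1]'hlt ∈ pvSpans (pvRstripNl l).toList 0 :=
        List.getElem_mem _
      have hmem2 : (pvSpans (pvRstripNl l).toList 0).getLast hne ∈ pvSpans (pvRstripNl l).toList 0 :=
        List.getLast_mem hne
      obtain ⟨c1, c2, c3⟩ := pvSpans_bounds _ _ _ hmem1
      obtain ⟨d1, d2, d3⟩ := pvSpans_bounds _ _ _ hmem2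
      have hlen1 : (pvSpans (pvRstripNl l).toList 0).length - 1 < (pvSpans (pvRstripNl l).toList 0).length := by omega
      obtain ⟨e1, e2, e3⟩ := pvSpans_bounds _ _ _
        (List.getElem_mem hlen1 : (pvSpans (pvRstripNl l).toList 0)[(pvSpans (pvRstripNl l).toList 0).length - 1]'hlen1 ∈ _)
      have hle : ((pvSpans (pvRstripNl l).toList 0).getD (h - 1) (0,0)).1 ≤
          (((pvSpans (pvRstripNl l).toList 0).getLast?).getD (0,0)).2 := by
        rw [hgd, hgl, List.getLast_eq_getElem]
        rcases Nat.lt_or_ge (h - 1) ((pvSpans (pvRstripNl l).toList 0).length - 1) with hlt2 | hge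
        · have hpw := pvSpans_pairwise (pvRstripNl l).toList 0
          rw [List.pairwise_iff_getElem] at hpw
          have := hpw (h - 1) ((pvSpans (pvRstripNl l).toList 0).length - 1) hlt hlen1 hlt2
          omega
        · have heq : h - 1 = (pvSpans (pvRstripNl l).toList 0).length - 1 := by omega
          simp only [heq]
          omega
      rw [pvSliceStr_ext]
      congr 1
      rw [hdec, pvExt_append _ _
        (((pvSpans (pvRstripNl l).toList 0).getD (h - 1) (0,0)).1,
          (((pvSpans (pvRstripNl l).toList 0).getLast?).getD (0,0)).2) hle
        (by rw [hgl]; simpa using d3)]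

-- zipping headers with the padded stripped tokens is A's enumerate view of the row
lemma pv_zip_pad_eq (headers tokens : List String) :
    headers.zip (tokens.map PySem.Str.strip ++ List.replicate (headers.length - tokens.length) "") =
    (PySem.List.enumerate headers).map
      (fun p => (p.2, if p.1 < (tokens.length : Int) then PySem.Str.strip (PySem.List.pyGetD tokens p.1 "") else "")) := by
  apply List.ext_getElem
  · simp [PySem.List.length_enumerate]
    omega
  · intro k h1 h2
    have hk : k < headers.length := by
      simpa [PySem.List.length_enumerate] using h2
    simp only [List.getElem_zip, List.getElem_map, PySem.List.getElem_enumerate, zero_add]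
    by_cases ht : k < tokens.length
    · rw [List.getElem_append_left (by simpa using ht)]
      simp [ht, PySem.List.pyGetD_natCast, List.getD_eq_getElem?_getD,
        show ((k : Int) < (tokens.length : Int)) from by exact_mod_cast ht]
    · rw [List.getElem_append_right (by simpa using ht)]
      simp [List.getElem_replicate,
        show ¬((k : Int) < (tokens.length : Int)) from by exact_mod_cast ht]

lemma pvRow_eq (headers : List String) (hh : headers ≠ []) (l : String) :
    pvRowA headers (PySem.Str.split₀Max (pvRstripNl l) ((headers.length : Int) - 1)) =
      pvRowB headers l (pvSpans l.toList 0) := by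
  have hh1 : 1 ≤ headers.length := List.length_pos_of_ne_nil hh
  have hv := pvVals_eq headers.length hh1 l
  unfold pvRowA pvRowB
  simp only []
  rw [← hv]
  have hzip := pv_zip_pad_eq headers (PySem.Str.split₀Max (pvRstripNl l) ((headers.length : Int) - 1))
  simp only [List.length_map] at *
  rw [hzip]
  simp [PySem.Dict.ofList, PySem.Dict.update, List.foldl_map]

lemma pvGoA_some : ∀ (lines : List String) (headers : List String), headers ≠ [] →
    ∀ result, pvGoA (some headers) result lines =
      result ++ (pvRowsB lines).map (fun r => pvRowB headers r.1 r.2) := by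
  intro lines
  induction lines with
  | nil => intro headers hh result; simp [pvGoA, pvRowsB]
  | cons raw rest ih =>
    intro headers hh result
    simp only [pvGoA, pvRowsB]
    rw [pvBlank_iff]
    by_cases hbl : (pvSpans raw.toList 0).isEmpty
    · simp only [hbl, if_pos]
      exact ih headers hh result
    · simp only [hbl, Bool.false_eq_true, if_false, List.map_cons]
      rw [ih headers hh, pvRow_eq headers hh raw]
      simp

-- ===== VERDICT (by name: the statement is the Claim_ definition above) =====
theorem parse_table_spec : Claim_equal_parse_table := by
  intro lines hdom
  clear hdom
  unfold Spec_parse_table parse_table parse_table_alt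
  induction lines with
  | nil => rfl
  | cons raw rest ih =>
    simp only [pvGoA, pvRowsB]
    rw [pvBlank_iff]
    by_cases hbl : (pvSpans raw.toList 0).isEmpty
    · simp only [hbl, if_pos]
      exact ih
    · simp only [hbl, Bool.false_eq_true, if_false]
      have hsp : pvSpans raw.toList 0 ≠ [] := by
        intro he; rw [he] at hbl; simp at hbl
      have hheq := pvHeaders_eq raw
      have hhne : PySem.Str.split₀ (pvRstripNl raw) ≠ [] := by
        rw [hheq]
        simpa using hsp
      rw [pvGoA_some rest _ hhne []]
      simp only [List.nil_append]
      rw [hheq]
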